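-- pv_equiv track=rewrite | github.com/MarvinSilcGit/Python | Functions/Uso_Geral/Telefonia.py | formatar_numero_telefone_movel
-- ===== SOURCE A (Python) =====
-- def estado_ddd (ddd):
--     """Função que armazena a lista de ddd do Brasil e sua respectiva região."""
--     dict_ddd_estado = {"68": "Acre", "96": "Amapá", "92": "Amazonas", "97": "Amazonas", "91": "Pará",
--                              "93": "Pará", "94": "Pará", "69": "Rondônia", "95": "Roraima", "63": "Tocantins",
--                              "61": "Distrito Federal", "62": "Goiás", "64": "Goiás", "65": "Mato Grosso",
--                              "66": "Mato Grosso", "67": "Mato Grosso do Sul", "82": "Alagoas", "71": "Bahia",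
--                              "73": "Bahia", "74": "Bahia", "75": "Bahia", "77": "Bahia", "79": "Sergipe",
--                              "85": "Ceará", "88": "Ceará", "98": "Maranhão", "99": "Maranhão", "83": "Paraíba",
--                              "81": "Pernambuco", "87": "Pernambuco", "86": "Piauí", "89": "Piauí", "84": "Rio Grande do Norte",
--                              "27": "Espírito Santo", "28": "Espírito Santo", "31": "Minas Gerais", "32": "Minas Gerais",
--                              "33": "Minas Gerais", "34": "Minas Gerais", "35": "Minas Gerais", "37": "Minas Gerais",
--                              "38": "Minas Gerais", "21": "Rio de Janeiro", "22": "Rio de Janeiro", "24": "Rio de Janeiro",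
--                              "11": "São Paulo", "12": "São Paulo", "13": "São Paulo", "14": "São Paulo", "15": "São Paulo",
--                        "16": "São Paulo", "17": "São Paulo", "18": "São Paulo", "19": "São Paulo", "41": "Paraná",
--                        "42": "Paraná", "43": "Paraná", "44": "Paraná", "45": "Paraná", "46": "Paraná", "51": "Rio Grande do Sul",
--                        "53": "Rio Grande do Sul", "54": "Rio Grande do Sul", "55": "Rio Grande do Sul", "47": "Santa Catarina",
--                        "48": "Santa Catarina", "49": "Santa Catarina"}
--
--     if not ddd in dict_ddd_estado:
--
--         return False
--
--     else:
--
--         return dict_ddd_estado[ddd]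
--
-- def formatar_numero_telefone_movel (numero: str):
--     """Função responsável por formatar o número de telefone móvel para o padrão brasileiro."""
--     if not estado_ddd(numero[0:2]) or len(numero) != 11:
--
--         return "Número inválido"
--
--     else:
--
--         numero_movel_formatado = list(numero)
--
--         for contador in range(11):
--
--             if contador == 0:
--
--                 numero_movel_formatado.insert(contador, '(')
--
--             elif contador == 3:
--
--                 numero_movel_formatado.insert(contador, ')')
--
--             elif contador == 4:
--
--                 numero_movel_formatado.insert(contador, ' ')
--
--             elif contador == 10:
--
--                 numero_movel_formatado.insert(contador, '-')
--
--         numero_movel_formatado = ''.join(numero_movel_formatado)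
--
--         return f"{numero_movel_formatado}"
-- ===== SOURCE B (Python) =====
-- # B: validity via a set of DDD codes + one closed-form slice concatenation (no dict, no loop, no insert).
-- VALID_DDDS = {"68", "96", "92", "97", "91", "93", "94", "69", "95", "63",
--               "61", "62", "64", "65", "66", "67", "82", "71", "73", "74",
--               "75", "77", "79", "85", "88", "98", "99", "83", "81", "87",
--               "86", "89", "84", "27", "28", "31", "32", "33", "34", "35",
--               "37", "38", "21", "22", "24", "11", "12", "13", "14", "15",
--               "16", "17", "18", "19", "41", "42", "43", "44", "45", "46",
--               "51", "53", "54", "55", "47", "48", "49"}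
--
-- def formatar_numero_telefone_movel(numero: str):
--     """Formata o número móvel: checa comprimento e DDD num conjunto, depois fatia."""
--     if len(numero) == 11 and numero[:2] in VALID_DDDS:
--         return "(" + numero[:2] + ") " + numero[2:7] + "-" + numero[7:]
--     return "Número inválido"
-- ===== Notes on version B (the rewrite author's own statement) =====
-- stated objective: simpler
-- what changed: A's dict-backed truthiness guard and character-insert loop with shifting indices are replaced by a membership test in a set of valid DDD codes plus one closed-form slice concatenation; no dict, no loop.
import Mathlib
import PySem

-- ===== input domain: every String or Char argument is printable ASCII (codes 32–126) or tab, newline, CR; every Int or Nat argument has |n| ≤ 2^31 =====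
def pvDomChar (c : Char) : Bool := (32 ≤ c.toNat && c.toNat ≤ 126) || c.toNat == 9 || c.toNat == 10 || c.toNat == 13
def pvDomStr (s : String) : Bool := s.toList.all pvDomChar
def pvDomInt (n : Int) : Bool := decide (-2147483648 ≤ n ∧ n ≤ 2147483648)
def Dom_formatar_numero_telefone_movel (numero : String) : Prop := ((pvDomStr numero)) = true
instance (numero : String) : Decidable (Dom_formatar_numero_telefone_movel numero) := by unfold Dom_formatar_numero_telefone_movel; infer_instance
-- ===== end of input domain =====

-- B replaces A's dict-truthiness guard and character-insert loop by a set membership test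
-- and a single closed-form slice concatenation (objective: simpler).

-- ===== PORT A =====
-- estado_ddd returns a state name or False; all state names are non-empty strings,
-- so Python truthiness of the result is exactly `Option.isSome` here (none = False).
def pvDddDict : PySem.Dict String String := PySem.Dict.ofList
  [("68", "Acre"), ("96", "Amapá"), ("92", "Amazonas"), ("97", "Amazonas"), ("91", "Pará"),
   ("93", "Pará"), ("94", "Pará"), ("69", "Rondônia"), ("95", "Roraima"), ("63", "Tocantins"),
   ("61", "Distrito Federal"), ("62", "Goiás"), ("64", "Goiás"), ("65", "Mato Grosso"),
   ("66", "Mato Grosso"), ("67", "Mato Grosso do Sul"), ("82", "Alagoas"), ("71", "Bahia"),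
   ("73", "Bahia"), ("74", "Bahia"), ("75", "Bahia"), ("77", "Bahia"), ("79", "Sergipe"),
   ("85", "Ceará"), ("88", "Ceará"), ("98", "Maranhão"), ("99", "Maranhão"), ("83", "Paraíba"),
   ("81", "Pernambuco"), ("87", "Pernambuco"), ("86", "Piauí"), ("89", "Piauí"), ("84", "Rio Grande do Norte"),
   ("27", "Espírito Santo"), ("28", "Espírito Santo"), ("31", "Minas Gerais"), ("32", "Minas Gerais"),
   ("33", "Minas Gerais"), ("34", "Minas Gerais"), ("35", "Minas Gerais"), ("37", "Minas Gerais"),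
   ("38", "Minas Gerais"), ("21", "Rio de Janeiro"), ("22", "Rio de Janeiro"), ("24", "Rio de Janeiro"),
   ("11", "São Paulo"), ("12", "São Paulo"), ("13", "São Paulo"), ("14", "São Paulo"), ("15", "São Paulo"),
   ("16", "São Paulo"), ("17", "São Paulo"), ("18", "São Paulo"), ("19", "São Paulo"), ("41", "Paraná"),
   ("42", "Paraná"), ("43", "Paraná"), ("44", "Paraná"), ("45", "Paraná"), ("46", "Paraná"), ("51", "Rio Grande do Sul"),
   ("53", "Rio Grande do Sul"), ("54", "Rio Grande do Sul"), ("55", "Rio Grande do Sul"), ("47", "Santa Catarina"),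
   ("48", "Santa Catarina"), ("49", "Santa Catarina")]

def estado_ddd (ddd : String) : Option String :=
  if ¬ (pvDddDict.contains ddd) then none else pvDddDict.get? ddd

def formatar_numero_telefone_movel (numero : String) : String :=
  if (estado_ddd (String.ofList (PySem.List.slice numero.toList (some 0) (some 2)))).isNone
      || (PySem.Str.len numero ≠ 11) then
    "Número inválido"
  else
    -- numero_movel_formatado = list(numero); the loop inserts at shifting indices; ''.join at the end
    String.ofList
      ((PySem.List.pyRange 0 11 1).foldl (fun acc contador =>
        if contador == 0 then PySem.List.insert acc contador '('
        else if contador == 3 then PySem.List.insert acc contador ')'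
        else if contador == 4 then PySem.List.insert acc contador ' '
        else if contador == 10 then PySem.List.insert acc contador '-'
        else acc) numero.toList)

-- ===== PORT B =====
-- The Python set VALID_DDDS, as the list of its distinct elements (PySem set convention).
def pvValidDDDs : List String :=
  ["68", "96", "92", "97", "91", "93", "94", "69", "95", "63",
   "61", "62", "64", "65", "66", "67", "82", "71", "73", "74",
   "75", "77", "79", "85", "88", "98", "99", "83", "81", "87",
   "86", "89", "84", "27", "28", "31", "32", "33", "34", "35",
   "37", "38", "21", "22", "24", "11", "12", "13", "14", "15",
   "16", "17", "18", "19", "41", "42", "43", "44", "45", "46",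
   "51", "53", "54", "55", "47", "48", "49"]

-- Python string concatenation of slices, ported exactly as append of the char-list slices.
def formatar_numero_telefone_movel_alt (numero : String) : String :=
  if PySem.Str.len numero == 11
      && pvValidDDDs.contains (String.ofList (PySem.List.slice numero.toList (some 0) (some 2))) then
    String.ofList (('(' :: PySem.List.slice numero.toList (some 0) (some 2))
      ++ (')' :: ' ' :: PySem.List.slice numero.toList (some 2) (some 7))
      ++ ('-' :: PySem.List.slice numero.toList (some 7) none))
  else
    "Número inválido"

-- ===== PRECONDITION & SPEC =====
def Spec_formatar_numero_telefone_movel (numero : String) (out : String) : Prop := out = formatar_numero_telefone_movel_alt numero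
instance (numero : String) (out : String) : Decidable (Spec_formatar_numero_telefone_movel numero out) := by unfold Spec_formatar_numero_telefone_movel; infer_instance

-- ===== CLAIM =====
def Claim_equal_formatar_numero_telefone_movel : Prop := ∀ (numero : String), Dom_formatar_numero_telefone_movel numero → Spec_formatar_numero_telefone_movel numero (formatar_numero_telefone_movel numero)

-- ===== LEMMAS AND PROOFS =====

set_option maxRecDepth 4096 in
-- A's dict has exactly the codes of B's set as keys.
lemma pv_contains_eq (s : String) : pvDddDict.contains s = pvValidDDDs.contains s := by
  rw [show pvDddDict = PySem.Dict.mk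
      [("68", "Acre"), ("96", "Amapá"), ("92", "Amazonas"), ("97", "Amazonas"), ("91", "Pará"),
   ("93", "Pará"), ("94", "Pará"), ("69", "Rondônia"), ("95", "Roraima"), ("63", "Tocantins"),
   ("61", "Distrito Federal"), ("62", "Goiás"), ("64", "Goiás"), ("65", "Mato Grosso"),
   ("66", "Mato Grosso"), ("67", "Mato Grosso do Sul"), ("82", "Alagoas"), ("71", "Bahia"),
   ("73", "Bahia"), ("74", "Bahia"), ("75", "Bahia"), ("77", "Bahia"), ("79", "Sergipe"),
   ("85", "Ceará"), ("88", "Ceará"), ("98", "Maranhão"), ("99", "Maranhão"), ("83", "Paraíba"),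
   ("81", "Pernambuco"), ("87", "Pernambuco"), ("86", "Piauí"), ("89", "Piauí"), ("84", "Rio Grande do Norte"),
   ("27", "Espírito Santo"), ("28", "Espírito Santo"), ("31", "Minas Gerais"), ("32", "Minas Gerais"),
   ("33", "Minas Gerais"), ("34", "Minas Gerais"), ("35", "Minas Gerais"), ("37", "Minas Gerais"),
   ("38", "Minas Gerais"), ("21", "Rio de Janeiro"), ("22", "Rio de Janeiro"), ("24", "Rio de Janeiro"),
   ("11", "São Paulo"), ("12", "São Paulo"), ("13", "São Paulo"), ("14", "São Paulo"), ("15", "São Paulo"),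
   ("16", "São Paulo"), ("17", "São Paulo"), ("18", "São Paulo"), ("19", "São Paulo"), ("41", "Paraná"),
   ("42", "Paraná"), ("43", "Paraná"), ("44", "Paraná"), ("45", "Paraná"), ("46", "Paraná"), ("51", "Rio Grande do Sul"),
   ("53", "Rio Grande do Sul"), ("54", "Rio Grande do Sul"), ("55", "Rio Grande do Sul"), ("47", "Santa Catarina"),
   ("48", "Santa Catarina"), ("49", "Santa Catarina")] from by decide,
      PySem.Dict.contains_eq_decide_mem_keys]
  rw [List.contains_eq_mem]
  simp only [PySem.Dict.keys_mk, List.map_cons, List.map_nil, pvValidDDDs]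
  rfl

-- estado_ddd is truthy exactly on B's set of codes.
lemma pv_isNone_estado (s : String) : (estado_ddd s).isNone = !(pvValidDDDs.contains s) := by
  unfold estado_ddd
  rw [← pv_contains_eq]
  by_cases h : pvDddDict.contains s = true
  · rw [if_neg (by simp [h]), h]
    have hs : (pvDddDict.get? s).isSome = true := by
      rw [← PySem.Dict.contains_eq_isSome_get?]; exact h
    cases hg : pvDddDict.get? s with
    | none => rw [hg] at hs; simp at hs
    | some v => simp
  · have hf : pvDddDict.contains s = false := by simpa using h
    rw [if_pos (by simp [hf]), hf]
    rfl

set_option maxHeartbeats 1000000 in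
-- On any 11-character list, A's insert loop produces exactly B's slice concatenation.
lemma pv_fmt_eq (l : List Char) (h : l.length = 11) :
    (PySem.List.pyRange 0 11 1).foldl (fun acc contador =>
        if contador == 0 then PySem.List.insert acc contador '('
        else if contador == 3 then PySem.List.insert acc contador ')'
        else if contador == 4 then PySem.List.insert acc contador ' '
        else if contador == 10 then PySem.List.insert acc contador '-'
        else acc) l
    = ('(' :: PySem.List.slice l (some 0) (some 2))
      ++ (')' :: ' ' :: PySem.List.slice l (some 2) (some 7))
      ++ ('-' :: PySem.List.slice l (some 7) none) := by
  match l, h with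
  | [a, b, c, d, e, f, g, h', i, j, k], _ => rfl

set_option maxHeartbeats 1000000 in
theorem formatar_numero_telefone_movel_spec : Claim_equal_formatar_numero_telefone_movel := by
  intro numero _
  unfold Spec_formatar_numero_telefone_movel formatar_numero_telefone_movel
    formatar_numero_telefone_movel_alt
  rw [pv_isNone_estado]
  by_cases hlen : PySem.Str.len numero = 11
  · have hl11 : (numero.length : Int) = 11 := by simpa using hlen
    by_cases hc : pvValidDDDs.contains (String.ofList (PySem.List.slice numero.toList (some 0) (some 2))) = true
    · have hmem : String.ofList (PySem.List.slice numero.toList none (some 2)) ∈ pvValidDDDs := by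
        simpa using hc
      rw [if_neg (by simp; exact ⟨hmem, hl11⟩), if_pos (by simp; exact ⟨hl11, hmem⟩)]
      have hl : numero.toList.length = 11 := by
        rw [PySem.Str.len_eq] at hlen; omega
      rw [pv_fmt_eq numero.toList hl]
    · have hnm : String.ofList (PySem.List.slice numero.toList none (some 2)) ∉ pvValidDDDs := by
        simpa using hc
      rw [if_pos (by simp; exact Or.inl hnm), if_neg (by simp; exact fun _ => hnm)]
  · have hne : ¬ ((numero.length : Int) = 11) := by simpa using hlen
    rw [if_pos (by simp; exact Or.inr hne), if_neg (by simp [hne])]
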